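-- pv_equiv track=rewrite | github.com/Patrick448/estudos-iniciacao-cientifica | GRN/eaMucommaLamdaGRN5-adpt.py | organiza_pontos
-- ===== SOURCE A (Python) =====
-- def organiza_pontos(solucao):
--     pA = []
--     pB = []
--     pC = []
--     pD = []
--     pE = []
--     pF = []
--     pG = []
--     pH = []
--     pI = []
--     pJ = []
--     for pontos in range(len(solucao)):
--         if pontos % 2 == 0 or pontos % 2 == 1:
--             pA.append(solucao[pontos][0])
--             pB.append(solucao[pontos][1])
--             pC.append(solucao[pontos][2])
--             pD.append(solucao[pontos][3])
--             pE.append(solucao[pontos][4])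
--             #pF.append(solucao[pontos][5])
--             #pG.append(solucao[pontos][6])
--             #pH.append(solucao[pontos][7])
--             #pI.append(solucao[pontos][8])
--             #pJ.append(solucao[pontos][9])
--     return pA, pB, pC, pD, pE
-- ===== SOURCE B (Python) =====
-- def organiza_pontos(solucao):
--     # Column-major: five independent passes, one comprehension per column,
--     # instead of one index-driven pass appending into five accumulators.
--     return ([row[0] for row in solucao],
--             [row[1] for row in solucao],
--             [row[2] for row in solucao],
--             [row[3] for row in solucao],
--             [row[4] for row in solucao])
-- ===== Notes on version B (the rewrite author's own statement) =====
-- stated objective: idiomatic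
-- what changed: Replaces A's single row-major index loop (with a vacuous parity test) that appends each row's entries into five accumulator lists by five independent column-major comprehension passes, one per column, with no accumulators or indices over the outer list.
import Mathlib
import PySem

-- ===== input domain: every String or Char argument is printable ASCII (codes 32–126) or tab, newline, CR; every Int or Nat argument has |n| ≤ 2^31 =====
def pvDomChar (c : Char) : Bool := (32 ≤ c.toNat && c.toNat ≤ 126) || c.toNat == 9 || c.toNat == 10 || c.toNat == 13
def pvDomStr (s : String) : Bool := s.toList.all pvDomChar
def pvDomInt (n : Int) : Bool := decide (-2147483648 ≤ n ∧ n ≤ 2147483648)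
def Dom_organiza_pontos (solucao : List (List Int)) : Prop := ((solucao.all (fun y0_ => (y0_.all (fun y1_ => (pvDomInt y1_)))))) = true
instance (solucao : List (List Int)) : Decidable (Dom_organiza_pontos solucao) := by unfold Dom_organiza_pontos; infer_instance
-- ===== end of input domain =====

-- B replaces A's single row-major index loop (with its vacuous parity test) appending into
-- five accumulators by five independent column-major comprehension passes, one per column (idiomatic).

-- ===== PORT A =====
-- Loop 'for pontos in range(len(solucao))', appending one element per column list each
-- iteration.  Indexing is via pyGetD: every index Python touches is in range under
-- Pre_organiza_pontos (rows have ≥ 5 entries), so the default is never used on claimed inputs.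
def organiza_pontos (solucao : List (List Int)) : List Int × List Int × List Int × List Int × List Int :=
  (PySem.List.pyRange 0 solucao.length 1).foldl
    (fun (acc : List Int × List Int × List Int × List Int × List Int) pontos =>
      if PySem.Int.mod pontos 2 == 0 || PySem.Int.mod pontos 2 == 1 then
        let row := PySem.List.pyGetD solucao pontos []
        (acc.1 ++ [PySem.List.pyGetD row 0 0],
         acc.2.1 ++ [PySem.List.pyGetD row 1 0],
         acc.2.2.1 ++ [PySem.List.pyGetD row 2 0],
         acc.2.2.2.1 ++ [PySem.List.pyGetD row 3 0],
         acc.2.2.2.2 ++ [PySem.List.pyGetD row 4 0])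
      else acc)
    ([], [], [], [], [])

-- ===== PORT B =====
-- Five independent column passes: '[row[j] for row in solucao]' becomes a map over the
-- rows reading index j (pyGetD; in range under Pre_, IndexError = outside Pre_).
def organiza_pontos_alt (solucao : List (List Int)) : List Int × List Int × List Int × List Int × List Int :=
  (solucao.map (fun row => PySem.List.pyGetD row 0 0),
   solucao.map (fun row => PySem.List.pyGetD row 1 0),
   solucao.map (fun row => PySem.List.pyGetD row 2 0),
   solucao.map (fun row => PySem.List.pyGetD row 3 0),
   solucao.map (fun row => PySem.List.pyGetD row 4 0))

-- ===== PRECONDITION & SPEC =====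
-- Pre_ excludes exactly the inputs on which Python A raises IndexError: a row with
-- fewer than 5 entries (B raises there too, in the pass for the first missing column).
def Pre_organiza_pontos (solucao : List (List Int)) : Prop :=
  ∀ r ∈ solucao, 5 ≤ r.length
instance (solucao : List (List Int)) : Decidable (Pre_organiza_pontos solucao) := by
  unfold Pre_organiza_pontos; infer_instance
def pvWitness_organiza_pontos : List (List Int) := [[1, 2, 3, 4, 5], [6, 7, 8, 9, 10]]
def Spec_organiza_pontos (solucao : List (List Int)) (out : List Int × List Int × List Int × List Int × List Int) : Prop := out = organiza_pontos_alt solucao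
instance (solucao : List (List Int)) (out : List Int × List Int × List Int × List Int × List Int) : Decidable (Spec_organiza_pontos solucao out) := by unfold Spec_organiza_pontos; infer_instance

-- ===== CLAIM (what is proved, stated in full; the proofs are below) =====
def Claim_equal_organiza_pontos : Prop := ∀ (solucao : List (List Int)), Dom_organiza_pontos solucao → Pre_organiza_pontos solucao → Spec_organiza_pontos solucao (organiza_pontos solucao)

-- ===== LEMMAS AND PROOFS =====

-- the j-th column entry of a row, as both ports read it
def pvCol (j : Int) (row : List Int) : Int := PySem.List.pyGetD row j 0

-- A's loop, starting at index pre.length into pre ++ xs, appends the five columns of xs.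
lemma organiza_pontos_loop (xs : List (List Int)) :
    ∀ (pre : List (List Int)) (a b c d e : List Int),
    (PySem.List.pyRange pre.length (pre ++ xs).length 1).foldl
      (fun (acc : List Int × List Int × List Int × List Int × List Int) pontos =>
        if PySem.Int.mod pontos 2 == 0 || PySem.Int.mod pontos 2 == 1 then
          let row := PySem.List.pyGetD (pre ++ xs) pontos []
          (acc.1 ++ [PySem.List.pyGetD row 0 0],
           acc.2.1 ++ [PySem.List.pyGetD row 1 0],
           acc.2.2.1 ++ [PySem.List.pyGetD row 2 0],
           acc.2.2.2.1 ++ [PySem.List.pyGetD row 3 0],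
           acc.2.2.2.2 ++ [PySem.List.pyGetD row 4 0])
        else acc)
      (a, b, c, d, e)
    = (a ++ xs.map (pvCol 0), b ++ xs.map (pvCol 1), c ++ xs.map (pvCol 2),
       d ++ xs.map (pvCol 3), e ++ xs.map (pvCol 4)) := by
  induction xs with
  | nil => intro pre a b c d e; simp [PySem.List.pyRange_one_eq_nil]
  | cons x xs ih =>
    intro pre a b c d e
    have hlt : (pre.length : Int) < ((pre ++ x :: xs).length : Int) := by
      simp
    rw [PySem.List.pyRange_one_cons hlt]
    have hcond : (PySem.Int.mod (pre.length : Int) 2 == 0 ||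
        PySem.Int.mod (pre.length : Int) 2 == 1) = true := by
      have h : ((pre.length : Int)).fmod 2 = 0 ∨ ((pre.length : Int)).fmod 2 = 1 := by
        rw [Int.fmod_eq_emod]; split_ifs <;> omega
      rcases h with h | h <;> simp [PySem.Int.mod, h]
    have hrow : PySem.List.pyGetD (pre ++ x :: xs) (pre.length : Int) [] = x := by
      simp [PySem.List.pyGetD]
    simp only [List.foldl_cons]
    rw [if_pos hcond]
    simp only [hrow]
    have hcast : (pre.length : Int) + 1 = ((pre ++ [x]).length : Int) := by simp
    have hlen : (pre ++ x :: xs).length = ((pre ++ [x]) ++ xs).length := by simp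
    rw [hcast, hlen, List.append_cons pre x xs]
    rw [ih (pre ++ [x])]
    simp [pvCol]

-- ===== VERDICT (by name: the statement is the Claim_ definition above) =====
theorem organiza_pontos_spec : Claim_equal_organiza_pontos := by
  intro solucao _ _
  unfold Spec_organiza_pontos organiza_pontos
  have h := organiza_pontos_loop solucao [] [] [] [] [] []
  simp only [List.nil_append, List.length_nil, Int.natCast_zero] at h
  rw [h]
  simp [organiza_pontos_alt, pvCol]
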